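-- pv_equiv track=rewrite | github.com/JKeskinen/GuitarWiring | app/main.py | _ai_helper_answer
-- ===== SOURCE A (Python) =====
-- FAQ_KB = {
--     'soldering_tools': (
--         '**Soldering — Tools & safety**\n'
--         '- Use a temperature-controlled iron (350–380°C / 660–715°F for electronics).\n'
--         '- Use rosin-core 60/40 or 63/37 solder for electronics; 0.7–1.0 mm diameter is convenient.\n'
--         '- Work in a well-ventilated area and wear eye protection.\n'
--         '- Keep tip clean with a damp sponge and tin the tip before and after use.\n'
--         '- Pre-tin wires and pads: heat the part, then apply solder to make a small shiny cone — then join.\n'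
--     ),
--     'soldering_steps': (
--         '**Soldering — Basic steps**\n'
--         '1) Strip ~3–6 mm of insulation.\n'
--         '2) Twist stranded wire or tin it lightly.\n'
--         '3) Heat the joint (pad or lug) with the iron, apply solder to the joint (not directly to the iron).\n'
--         '4) Withdraw solder, then iron, and let the joint cool without moving.\n'
--         '5) Inspect for a smooth, shiny, concave joint ("volcano").\n'
--     ),
--     'hum_cancelling_overview': (
--         '**Hum-cancelling — Overview**\n'
--         '- Humbuckers cancel mains hum by combining two coils with opposite magnetic polarity and opposite electrical phase.\n'
--         '- To cancel hum, coils must be reverse-wound *and* reverse-polarity (RWRP).\n'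
--         '- If one coil is reversed only electrically (phase) but not magnetically, cancellation fails.\n'
--     ),
--     'hum_cancelling_when_wiring': (
--         '**Wiring tips to preserve hum-cancelling**\n'
--         '- Wire the two coils in series or parallel as intended by the pickup design. Modern humbuckers use series for full output.\n'
--         '- When splitting coils (coil-split), you lose one coil and thus the hum cancellation — use noise-free split circuits or stacking designs if you need single-coil tone without hum.\n'
--         '- For phase switching (series ↔ parallel ↔ split) use proper switching that preserves magnetic/ electrical relationships.\n'
--     ),
--     'grounding': (
--         '**Grounding & shielding**\n'
--         '- Ground (pot backs, chassis) must be connected to pickup ground (bare or black depending on manufacturer).\n'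
--         '- Solder the bare (shield) to ground; do not rely on friction contacts.\n'
--         '- Use shielding (copper tape, conductive paint) in control cavities and connect it to ground to reduce hum.\n'
--     ),
--     'phase_checks': (
--         '**Phase checking (practical)**\n'
--         '- Use a multimeter: measure DC resistance of coils to identify which wires are which.\n'
--         '- Use a small metal probe to touch pole pieces while measuring resistance: if resistance goes up when touched, that coil end is the positive lead for that polarity test.\n'
--         '- Swap coil connections if you detect reversed electrical polarity so North START == HOT mapping matches expected wiring.\n'
--     ),
--     'coil_split_hum': (
--         '**Coil-splitting & hum**\n'
--         '- Coil split disables one coil; hum cancellation is lost and single-coil hum will reappear.\n'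
--         '- To reduce hum while split: use resistor or phase-cancellation circuits, or use stacked noiseless pickups that emulate single-coil tone without hum.\n'
--     ),
-- }
--
-- def _ai_helper_answer(q: str) -> str:
--     ql = (q or '').lower()
--     if not ql.strip():
--         return 'Ask a specific question about soldering, grounding, or hum-cancelling (e.g. "How do I solder a pot lug?", "Why does my coil hum after splitting?").'
--     # keyword matching
--     if any(k in ql for k in ('solder', 'soldering', 'iron', 'tin', 'solder tip', 'desolder')):
--         return FAQ_KB['soldering_tools'] + '\n\n' + FAQ_KB['soldering_steps']
--     if any(k in ql for k in ('hum', 'hum cancelling', 'hum-cancelling', 'noise cancelling', 'hum cancel')):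
--         return FAQ_KB['hum_cancelling_overview'] + '\n\n' + FAQ_KB['hum_cancelling_when_wiring']
--     if any(k in ql for k in ('ground', 'shield', 'shielding', 'bare', 'grounding')):
--         return FAQ_KB['grounding']
--     if any(k in ql for k in ('phase', 'phase check', 'polarity', 'probe', 'resistance increase', 'reverse')):
--         return FAQ_KB['phase_checks']
--     if any(k in ql for k in ('split', 'coil split', 'coil-split', 'splitting')):
--         return FAQ_KB['coil_split_hum']
--     # fallback: give general guidance + resources
--     return (
--         "I don't have a perfect match for that question. Here are general tips:\n\n"
--         "- Be specific: mention if it's about a pot lug, jack, soldering stranded wire, coil-splitting wiring, or shielding.\n"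
--         "- For step-by-step soldering: use a temperature-controlled iron, clean/tin the tip, pre-tin wires, heat the joint, apply solder to the joint, and let cool.\n\n"
--         "Useful references: StewMac (stewmac.com) and Seymour Duncan (seymourduncan.com) have practical wiring and soldering guides."
--     )
-- ===== SOURCE B (Python) =====
-- # B: single left-to-right text scan (naive multi-pattern matcher) instead of A's
-- # per-keyword substring searches in an if-chain: every keyword carries a rule
-- # priority; one pass over the query's positions tries each keyword as a prefix
-- # there and keeps the best (lowest) priority seen; the answer is then looked up
-- # by that priority. Same answers as A on every input.
-- FAQ_KB = {
--     'soldering_tools': (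
--         '**Soldering — Tools & safety**\n'
--         '- Use a temperature-controlled iron (350–380°C / 660–715°F for electronics).\n'
--         '- Use rosin-core 60/40 or 63/37 solder for electronics; 0.7–1.0 mm diameter is convenient.\n'
--         '- Work in a well-ventilated area and wear eye protection.\n'
--         '- Keep tip clean with a damp sponge and tin the tip before and after use.\n'
--         '- Pre-tin wires and pads: heat the part, then apply solder to make a small shiny cone — then join.\n'
--     ),
--     'soldering_steps': (
--         '**Soldering — Basic steps**\n'
--         '1) Strip ~3–6 mm of insulation.\n'
--         '2) Twist stranded wire or tin it lightly.\n'
--         '3) Heat the joint (pad or lug) with the iron, apply solder to the joint (not directly to the iron).\n'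
--         '4) Withdraw solder, then iron, and let the joint cool without moving.\n'
--         '5) Inspect for a smooth, shiny, concave joint ("volcano").\n'
--     ),
--     'hum_cancelling_overview': (
--         '**Hum-cancelling — Overview**\n'
--         '- Humbuckers cancel mains hum by combining two coils with opposite magnetic polarity and opposite electrical phase.\n'
--         '- To cancel hum, coils must be reverse-wound *and* reverse-polarity (RWRP).\n'
--         '- If one coil is reversed only electrically (phase) but not magnetically, cancellation fails.\n'
--     ),
--     'hum_cancelling_when_wiring': (
--         '**Wiring tips to preserve hum-cancelling**\n'
--         '- Wire the two coils in series or parallel as intended by the pickup design. Modern humbuckers use series for full output.\n'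
--         '- When splitting coils (coil-split), you lose one coil and thus the hum cancellation — use noise-free split circuits or stacking designs if you need single-coil tone without hum.\n'
--         '- For phase switching (series ↔ parallel ↔ split) use proper switching that preserves magnetic/ electrical relationships.\n'
--     ),
--     'grounding': (
--         '**Grounding & shielding**\n'
--         '- Ground (pot backs, chassis) must be connected to pickup ground (bare or black depending on manufacturer).\n'
--         '- Solder the bare (shield) to ground; do not rely on friction contacts.\n'
--         '- Use shielding (copper tape, conductive paint) in control cavities and connect it to ground to reduce hum.\n'
--     ),
--     'phase_checks': (
--         '**Phase checking (practical)**\n'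
--         '- Use a multimeter: measure DC resistance of coils to identify which wires are which.\n'
--         '- Use a small metal probe to touch pole pieces while measuring resistance: if resistance goes up when touched, that coil end is the positive lead for that polarity test.\n'
--         '- Swap coil connections if you detect reversed electrical polarity so North START == HOT mapping matches expected wiring.\n'
--     ),
--     'coil_split_hum': (
--         '**Coil-splitting & hum**\n'
--         '- Coil split disables one coil; hum cancellation is lost and single-coil hum will reappear.\n'
--         '- To reduce hum while split: use resistor or phase-cancellation circuits, or use stacked noiseless pickups that emulate single-coil tone without hum.\n'
--     ),
-- }
--
-- _PROMPT = 'Ask a specific question about soldering, grounding, or hum-cancelling (e.g. "How do I solder a pot lug?", "Why does my coil hum after splitting?").'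
--
-- _FALLBACK = (
--     "I don't have a perfect match for that question. Here are general tips:\n\n"
--     "- Be specific: mention if it's about a pot lug, jack, soldering stranded wire, coil-splitting wiring, or shielding.\n"
--     "- For step-by-step soldering: use a temperature-controlled iron, clean/tin the tip, pre-tin wires, heat the joint, apply solder to the joint, and let cool.\n\n"
--     "Useful references: StewMac (stewmac.com) and Seymour Duncan (seymourduncan.com) have practical wiring and soldering guides."
-- )
--
-- # every keyword tagged with the priority (rule number) of the branch it belongs to
-- _KEYWORDS = [
--     ('solder', 0), ('soldering', 0), ('iron', 0), ('tin', 0), ('solder tip', 0), ('desolder', 0),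
--     ('hum', 1), ('hum cancelling', 1), ('hum-cancelling', 1), ('noise cancelling', 1), ('hum cancel', 1),
--     ('ground', 2), ('shield', 2), ('shielding', 2), ('bare', 2), ('grounding', 2),
--     ('phase', 3), ('phase check', 3), ('polarity', 3), ('probe', 3), ('resistance increase', 3), ('reverse', 3),
--     ('split', 4), ('coil split', 4), ('coil-split', 4), ('splitting', 4),
-- ]
--
-- _RESPONSES = [
--     FAQ_KB['soldering_tools'] + '\n\n' + FAQ_KB['soldering_steps'],
--     FAQ_KB['hum_cancelling_overview'] + '\n\n' + FAQ_KB['hum_cancelling_when_wiring'],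
--     FAQ_KB['grounding'],
--     FAQ_KB['phase_checks'],
--     FAQ_KB['coil_split_hum'],
-- ]
--
-- def _ai_helper_answer(q: str) -> str:
--     ql = (q or '').lower()
--     if not ql.strip():
--         return _PROMPT
--     # one scan over the text: at each position try each keyword as a prefix,
--     # remember the best (lowest) priority that occurs anywhere in the query
--     best = None
--     for i in range(len(ql) + 1):
--         for kw, prio in _KEYWORDS:
--             if ql.startswith(kw, i) and (best is None or prio < best):
--                 best = prio
--     return _RESPONSES[best] if best is not None else _FALLBACK
-- ===== Notes on version B (the rewrite author's own statement) =====
-- stated objective: alternative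
-- what changed: Replaced A's if-chain of per-keyword substring searches by a single left-to-right scan over the query's positions (naive multi-pattern matching): each keyword carries the priority of its branch, the scan keeps the lowest priority whose keyword starts at some position, and the answer is looked up by that priority.
import Mathlib
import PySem

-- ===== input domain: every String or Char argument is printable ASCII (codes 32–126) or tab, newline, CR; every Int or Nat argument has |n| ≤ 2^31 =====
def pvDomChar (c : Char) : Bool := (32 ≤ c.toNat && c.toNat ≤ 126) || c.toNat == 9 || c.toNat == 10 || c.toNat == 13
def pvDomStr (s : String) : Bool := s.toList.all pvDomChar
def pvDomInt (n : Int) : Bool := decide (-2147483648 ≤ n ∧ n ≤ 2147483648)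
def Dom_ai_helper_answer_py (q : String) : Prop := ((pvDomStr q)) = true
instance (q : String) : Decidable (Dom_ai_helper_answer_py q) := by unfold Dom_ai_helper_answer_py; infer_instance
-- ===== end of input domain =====

-- B replaces A's if-chain of per-keyword substring searches by one left-to-right scan over
-- the query's positions keeping the best-priority keyword that starts there (objective: alternative).

-- shared module constants (Python module-level FAQ_KB and the two fixed messages)
def pvTools : String := "**Soldering — Tools & safety**\n- Use a temperature-controlled iron (350–380°C / 660–715°F for electronics).\n- Use rosin-core 60/40 or 63/37 solder for electronics; 0.7–1.0 mm diameter is convenient.\n- Work in a well-ventilated area and wear eye protection.\n- Keep tip clean with a damp sponge and tin the tip before and after use.\n- Pre-tin wires and pads: heat the part, then apply solder to make a small shiny cone — then join.\n"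

def pvSteps : String := "**Soldering — Basic steps**\n1) Strip ~3–6 mm of insulation.\n2) Twist stranded wire or tin it lightly.\n3) Heat the joint (pad or lug) with the iron, apply solder to the joint (not directly to the iron).\n4) Withdraw solder, then iron, and let the joint cool without moving.\n5) Inspect for a smooth, shiny, concave joint (\"volcano\").\n"

def pvHumOv : String := "**Hum-cancelling — Overview**\n- Humbuckers cancel mains hum by combining two coils with opposite magnetic polarity and opposite electrical phase.\n- To cancel hum, coils must be reverse-wound *and* reverse-polarity (RWRP).\n- If one coil is reversed only electrically (phase) but not magnetically, cancellation fails.\n"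

def pvHumWire : String := "**Wiring tips to preserve hum-cancelling**\n- Wire the two coils in series or parallel as intended by the pickup design. Modern humbuckers use series for full output.\n- When splitting coils (coil-split), you lose one coil and thus the hum cancellation — use noise-free split circuits or stacking designs if you need single-coil tone without hum.\n- For phase switching (series ↔ parallel ↔ split) use proper switching that preserves magnetic/ electrical relationships.\n"

def pvGround : String := "**Grounding & shielding**\n- Ground (pot backs, chassis) must be connected to pickup ground (bare or black depending on manufacturer).\n- Solder the bare (shield) to ground; do not rely on friction contacts.\n- Use shielding (copper tape, conductive paint) in control cavities and connect it to ground to reduce hum.\n"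

def pvPhase : String := "**Phase checking (practical)**\n- Use a multimeter: measure DC resistance of coils to identify which wires are which.\n- Use a small metal probe to touch pole pieces while measuring resistance: if resistance goes up when touched, that coil end is the positive lead for that polarity test.\n- Swap coil connections if you detect reversed electrical polarity so North START == HOT mapping matches expected wiring.\n"

def pvSplit : String := "**Coil-splitting & hum**\n- Coil split disables one coil; hum cancellation is lost and single-coil hum will reappear.\n- To reduce hum while split: use resistor or phase-cancellation circuits, or use stacked noiseless pickups that emulate single-coil tone without hum.\n"

def pvPrompt : String := "Ask a specific question about soldering, grounding, or hum-cancelling (e.g. \"How do I solder a pot lug?\", \"Why does my coil hum after splitting?\")."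

def pvFallback : String := "I don't have a perfect match for that question. Here are general tips:\n\n- Be specific: mention if it's about a pot lug, jack, soldering stranded wire, coil-splitting wiring, or shielding.\n- For step-by-step soldering: use a temperature-controlled iron, clean/tin the tip, pre-tin wires, heat the joint, apply solder to the joint, and let cool.\n\nUseful references: StewMac (stewmac.com) and Seymour Duncan (seymourduncan.com) have practical wiring and soldering guides."

-- ===== PORT A =====
-- literal transliteration of A's if-chain of keyword checks
def ai_helper_answer_py (q : String) : String :=
  let ql := PySem.Str.lower q
  if PySem.Str.strip ql = "" then pvPrompt
  else if (["solder", "soldering", "iron", "tin", "solder tip", "desolder"] : List String).any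
            (fun k => PySem.Str.isIn k ql) then pvTools ++ "\n\n" ++ pvSteps
  else if (["hum", "hum cancelling", "hum-cancelling", "noise cancelling", "hum cancel"] : List String).any
            (fun k => PySem.Str.isIn k ql) then pvHumOv ++ "\n\n" ++ pvHumWire
  else if (["ground", "shield", "shielding", "bare", "grounding"] : List String).any
            (fun k => PySem.Str.isIn k ql) then pvGround
  else if (["phase", "phase check", "polarity", "probe", "resistance increase", "reverse"] : List String).any
            (fun k => PySem.Str.isIn k ql) then pvPhase
  else if (["split", "coil split", "coil-split", "splitting"] : List String).any
            (fun k => PySem.Str.isIn k ql) then pvSplit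
  else pvFallback

-- ===== PORT B =====
-- B's flat keyword list: each keyword tagged with the priority of its rule (Python _KEYWORDS)
def pvFlat : List (String × Nat) :=
  [("solder", 0), ("soldering", 0), ("iron", 0), ("tin", 0), ("solder tip", 0), ("desolder", 0),
   ("hum", 1), ("hum cancelling", 1), ("hum-cancelling", 1), ("noise cancelling", 1), ("hum cancel", 1),
   ("ground", 2), ("shield", 2), ("shielding", 2), ("bare", 2), ("grounding", 2),
   ("phase", 3), ("phase check", 3), ("polarity", 3), ("probe", 3), ("resistance increase", 3), ("reverse", 3),
   ("split", 4), ("coil split", 4), ("coil-split", 4), ("splitting", 4)]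

-- Python _RESPONSES, indexed by priority
def pvResponses : List String :=
  [pvTools ++ "\n\n" ++ pvSteps, pvHumOv ++ "\n\n" ++ pvHumWire, pvGround, pvPhase, pvSplit]

-- one step of B's inner loop: Python 'if ql.startswith(kw, i) and (best is None or prio < best): best = prio'
-- (ql.startswith(kw, i) with 0 ≤ i ≤ len(ql) is exactly: kw is a prefix of ql[i:], i.e. of ql.drop i)
def pvStep (ql : List Char) (i : Nat) (best : Option Nat) (kr : String × Nat) : Option Nat :=
  if PySem.Chars.startswith (ql.drop i) kr.1.toList
       && (match best with | none => true | some b => decide (kr.2 < b)) then some kr.2 else best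

-- B: scan every position of the query, keep the lowest priority whose keyword starts there
def ai_helper_answer_py_alt (q : String) : String :=
  let ql := (PySem.Str.lower q).toList
  if PySem.Str.strip (PySem.Str.lower q) = "" then pvPrompt
  else
    match (List.range (ql.length + 1)).foldl (fun b i => pvFlat.foldl (pvStep ql i) b) none with
    | some b => pvResponses.getD b pvFallback
    | none => pvFallback

-- ===== PRECONDITION & SPEC =====
def Spec_ai_helper_answer_py (q : String) (out : String) : Prop := out = ai_helper_answer_py_alt q
instance (q : String) (out : String) : Decidable (Spec_ai_helper_answer_py q out) := by unfold Spec_ai_helper_answer_py; infer_instance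

-- ===== CLAIM =====
def Claim_equal_ai_helper_answer_py : Prop := ∀ (q : String), Dom_ai_helper_answer_py q → Spec_ai_helper_answer_py q (ai_helper_answer_py q)

-- ===== LEMMAS AND PROOFS =====

-- A's keyword groups by branch number (proof-side view of A's literal lists)
def pvGroup : Nat → List String
  | 0 => ["solder", "soldering", "iron", "tin", "solder tip", "desolder"]
  | 1 => ["hum", "hum cancelling", "hum-cancelling", "noise cancelling", "hum cancel"]
  | 2 => ["ground", "shield", "shielding", "bare", "grounding"]
  | 3 => ["phase", "phase check", "polarity", "probe", "resistance increase", "reverse"]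
  | 4 => ["split", "coil split", "coil-split", "splitting"]
  | _ => []

def pvHit (ql : List Char) (r : Nat) : Bool :=
  (pvGroup r).any (fun k => PySem.Chars.isIn k.toList ql)

-- concrete facts about the tables
theorem pv_flat_group : ∀ kr ∈ pvFlat, kr.1 ∈ pvGroup kr.2 := by decide

theorem pv_flat_lt5 : ∀ kr ∈ pvFlat, kr.2 < 5 := by decide

theorem pv_group_flat : ∀ r < 5, ∀ k ∈ pvGroup r, (k, r) ∈ pvFlat := by decide

theorem pv_group_ne : ∀ r < 5, ∀ k ∈ pvGroup r, k.toList ≠ [] := by decide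

-- case analysis for one step of B's loop
theorem pvStep_eq (ql : List Char) (i : Nat) (b : Option Nat) (kr : String × Nat) :
    pvStep ql i b kr = b ∨
      (PySem.Chars.startswith (ql.drop i) kr.1.toList = true ∧ pvStep ql i b kr = some kr.2) := by
  cases b <;> simp only [pvStep] <;> split
  · rename_i h
    rw [Bool.and_eq_true] at h
    exact Or.inr ⟨h.1, rfl⟩
  · exact Or.inl rfl
  · rename_i h
    rw [Bool.and_eq_true] at h
    exact Or.inr ⟨h.1, rfl⟩
  · exact Or.inl rfl

theorem pvStep_le (ql : List Char) (i : Nat) (x : Nat) (kr : String × Nat) :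
    ∃ y, pvStep ql i (some x) kr = some y ∧ y ≤ x := by
  simp only [pvStep]
  split
  · rename_i h
    rw [Bool.and_eq_true] at h
    exact ⟨kr.2, rfl, Nat.le_of_lt (of_decide_eq_true h.2)⟩
  · exact ⟨x, rfl, Nat.le_refl x⟩

theorem pvStep_hit (ql : List Char) (i : Nat) (b : Option Nat) (kr : String × Nat)
    (hs : PySem.Chars.startswith (ql.drop i) kr.1.toList = true) :
    ∃ y, pvStep ql i b kr = some y ∧ y ≤ kr.2 := by
  cases b with
  | none => exact ⟨kr.2, by simp [pvStep, hs], Nat.le_refl _⟩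
  | some x =>
    by_cases hlt : kr.2 < x
    · exact ⟨kr.2, by simp [pvStep, hs, hlt], Nat.le_refl _⟩
    · exact ⟨x, by simp [pvStep, hs, hlt], Nat.le_of_not_lt hlt⟩

-- inner fold: soundness of the produced value
theorem pv_inner_sound (ql : List Char) (i : Nat) (L : List (String × Nat)) (b : Option Nat) (r : Nat)
    (h : L.foldl (pvStep ql i) b = some r) :
    (∃ kr ∈ L, PySem.Chars.startswith (ql.drop i) kr.1.toList = true ∧ kr.2 = r) ∨ b = some r := by
  induction L generalizing b with
  | nil => exact Or.inr h
  | cons a t ih =>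
    simp only [List.foldl_cons] at h
    rcases ih _ h with ⟨kr, hm, hs, hv⟩ | hb
    · exact Or.inl ⟨kr, List.mem_cons_of_mem _ hm, hs, hv⟩
    · rcases pvStep_eq ql i b a with he | ⟨hs, he⟩
      · exact Or.inr (he ▸ hb)
      · rw [he] at hb
        exact Or.inl ⟨a, List.mem_cons_self, hs, (Option.some.injEq _ _).mp hb⟩

-- inner fold never worsens an existing best
theorem pv_inner_le (ql : List Char) (i : Nat) (L : List (String × Nat)) (b : Option Nat) (x : Nat)
    (hb : b = some x) : ∃ m, L.foldl (pvStep ql i) b = some m ∧ m ≤ x := by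
  induction L generalizing b x with
  | nil => exact ⟨x, by simpa using hb⟩
  | cons a t ih =>
    subst hb
    simp only [List.foldl_cons]
    obtain ⟨y, he, hy⟩ := pvStep_le ql i x a
    rw [he]
    obtain ⟨m, hm, hle⟩ := ih (some y) y rfl
    exact ⟨m, hm, Nat.le_trans hle hy⟩

-- inner fold: a matching keyword forces a best no worse than its priority
theorem pv_inner_hit (ql : List Char) (i : Nat) (L : List (String × Nat)) (b : Option Nat)
    (kr : String × Nat) (hm : kr ∈ L) (hs : PySem.Chars.startswith (ql.drop i) kr.1.toList = true) :
    ∃ m, L.foldl (pvStep ql i) b = some m ∧ m ≤ kr.2 := by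
  induction L generalizing b with
  | nil => cases hm
  | cons a t ih =>
    simp only [List.foldl_cons]
    rcases List.mem_cons.mp hm with rfl | hmt
    · obtain ⟨y, he, hy⟩ := pvStep_hit ql i b kr hs
      rw [he]
      obtain ⟨m, hm', hle⟩ := pv_inner_le ql i t (some y) y rfl
      exact ⟨m, hm', Nat.le_trans hle hy⟩
    · exact ih _ hmt

-- outer fold: soundness
theorem pv_outer_sound (ql : List Char) (I : List Nat) (b : Option Nat) (r : Nat)
    (h : I.foldl (fun b i => pvFlat.foldl (pvStep ql i) b) b = some r) :
    (∃ i ∈ I, ∃ kr ∈ pvFlat, PySem.Chars.startswith (ql.drop i) kr.1.toList = true ∧ kr.2 = r)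
      ∨ b = some r := by
  induction I generalizing b with
  | nil => exact Or.inr h
  | cons a t ih =>
    simp only [List.foldl_cons] at h
    rcases ih _ h with ⟨i, hi, kr, hm, hs, hv⟩ | hb
    · exact Or.inl ⟨i, List.mem_cons_of_mem _ hi, kr, hm, hs, hv⟩
    · rcases pv_inner_sound ql a pvFlat b r hb with ⟨kr, hm, hs, hv⟩ | hb'
      · exact Or.inl ⟨a, List.mem_cons_self, kr, hm, hs, hv⟩
      · exact Or.inr hb'

-- outer fold never worsens an existing best
theorem pv_outer_le (ql : List Char) (I : List Nat) (b : Option Nat) (x : Nat)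
    (hb : b = some x) : ∃ m, I.foldl (fun b i => pvFlat.foldl (pvStep ql i) b) b = some m ∧ m ≤ x := by
  induction I generalizing b x with
  | nil => exact ⟨x, by simpa using hb⟩
  | cons a t ih =>
    simp only [List.foldl_cons]
    obtain ⟨m, hm, hle⟩ := pv_inner_le ql a pvFlat b x hb
    obtain ⟨m', hm', hle'⟩ := ih _ _ hm
    exact ⟨m', hm', Nat.le_trans hle' hle⟩

-- outer fold: a match anywhere forces a best no worse than its priority
theorem pv_outer_hit (ql : List Char) (I : List Nat) (b : Option Nat) (i : Nat)
    (kr : String × Nat) (hi : i ∈ I) (hm : kr ∈ pvFlat)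
    (hs : PySem.Chars.startswith (ql.drop i) kr.1.toList = true) :
    ∃ m, I.foldl (fun b i => pvFlat.foldl (pvStep ql i) b) b = some m ∧ m ≤ kr.2 := by
  induction I generalizing b with
  | nil => cases hi
  | cons a t ih =>
    simp only [List.foldl_cons]
    rcases List.mem_cons.mp hi with rfl | hit
    · obtain ⟨m, hm', hle⟩ := pv_inner_hit ql i pvFlat b kr hm hs
      obtain ⟨m', hm'', hle'⟩ := pv_outer_le ql t _ _ hm'
      exact ⟨m', hm'', Nat.le_trans hle' hle⟩
    · exact ih _ hit

-- a matched (position, keyword) pair makes its whole group hit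
theorem pv_matched_hit (ql : List Char) (i : Nat) (kr : String × Nat) (hm : kr ∈ pvFlat)
    (hs : PySem.Chars.startswith (ql.drop i) kr.1.toList = true) : pvHit ql kr.2 = true := by
  have hinf : PySem.Chars.isIn kr.1.toList ql = true :=
    (PySem.Chars.exists_prefix_drop_iff_isIn _ _).mp ⟨i, (PySem.Chars.startswith_iff _ _).mp hs⟩
  exact List.any_eq_true.mpr ⟨kr.1, pv_flat_group kr hm, hinf⟩

-- the scan returns exactly the first (lowest) hit group
theorem pv_scan_eq_first (ql : List Char) (r : Nat) (hr : r < 5) (hhit : pvHit ql r = true)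
    (hlow : ∀ r' < r, pvHit ql r' = false) :
    (List.range (ql.length + 1)).foldl (fun b i => pvFlat.foldl (pvStep ql i) b) none = some r := by
  obtain ⟨k, hk, hin⟩ := List.any_eq_true.mp hhit
  obtain ⟨j, hpre⟩ := (PySem.Chars.exists_prefix_drop_iff_isIn _ _).mpr hin
  have hj : j ≤ ql.length := by
    by_contra hgt
    rw [List.drop_eq_nil_of_le (Nat.le_of_lt (Nat.lt_of_not_le hgt))] at hpre
    exact pv_group_ne r hr k hk (List.prefix_nil.mp hpre)
  obtain ⟨m, hmres, hmle⟩ := pv_outer_hit ql (List.range (ql.length + 1)) none j (k, r)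
    (List.mem_range.mpr (Nat.lt_succ_of_le hj)) (pv_group_flat r hr k hk)
    ((PySem.Chars.startswith_iff _ _).mpr hpre)
  rcases pv_outer_sound ql _ none m hmres with ⟨i, _, kr, hkr, hs, hv⟩ | hnone
  · have : pvHit ql kr.2 = true := pv_matched_hit ql i kr hkr hs
    rw [hv] at this
    have : ¬ m < r := fun hlt => by rw [hlow m hlt] at this; cases this
    have : m = r := le_antisymm hmle (not_lt.mp this)
    rw [← this]; exact hmres
  · cases hnone

-- no group hits ⇒ the scan returns none
theorem pv_scan_none (ql : List Char) (hall : ∀ r' < 5, pvHit ql r' = false) :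
    (List.range (ql.length + 1)).foldl (fun b i => pvFlat.foldl (pvStep ql i) b) none = none := by
  cases h : (List.range (ql.length + 1)).foldl (fun b i => pvFlat.foldl (pvStep ql i) b) none with
  | none => rfl
  | some r =>
    rcases pv_outer_sound ql _ none r h with ⟨i, _, kr, hkr, hs, hv⟩ | hnone
    · have hhit := pv_matched_hit ql i kr hkr hs
      rw [hv] at hhit
      have := pv_flat_lt5 kr hkr
      rw [hv] at this
      rw [hall r this] at hhit
      cases hhit
    · cases hnone

-- A's branch condition r equals pvHit on the char list
theorem pv_cond_eq (q : String) (r : Nat) :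
    (pvGroup r).any (fun k => PySem.Str.isIn k (PySem.Str.lower q))
      = pvHit (PySem.Str.lower q).toList r := by
  unfold pvHit
  induction pvGroup r with
  | nil => rfl
  | cons a t ih => simp [List.any_cons, PySem.Str.isIn]

theorem pv_main (q : String) : ai_helper_answer_py q = ai_helper_answer_py_alt q := by
  simp only [ai_helper_answer_py, ai_helper_answer_py_alt]
  by_cases h0 : PySem.Str.strip (PySem.Str.lower q) = ""
  · simp [h0]
  · simp only [if_neg h0]
    set ql := (PySem.Str.lower q).toList with hql
    have c0 := pv_cond_eq q 0
    have c1 := pv_cond_eq q 1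
    have c2 := pv_cond_eq q 2
    have c3 := pv_cond_eq q 3
    have c4 := pv_cond_eq q 4
    simp only [pvGroup] at c0 c1 c2 c3 c4
    rw [c0, c1, c2, c3, c4, ← hql]
    cases h1 : pvHit ql 0 with
    | true =>
      rw [pv_scan_eq_first ql 0 (by omega) h1 (by omega)]
      rfl
    | false =>
      rw [if_neg (by simp : ¬ (false = true))]
      cases h2 : pvHit ql 1 with
      | true =>
        rw [pv_scan_eq_first ql 1 (by omega) h2 (by intro r' hr'; rcases (by omega : r' = 0) with rfl; exact h1)]
        rfl
      | false =>
        rw [if_neg (by simp : ¬ (false = true))]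
        cases h3 : pvHit ql 2 with
        | true =>
          rw [pv_scan_eq_first ql 2 (by omega) h3 (by intro r' hr'; rcases (by omega : r' = 0 ∨ r' = 1) with rfl | rfl; exacts [h1, h2])]
          rfl
        | false =>
          rw [if_neg (by simp : ¬ (false = true))]
          cases h4 : pvHit ql 3 with
          | true =>
            rw [pv_scan_eq_first ql 3 (by omega) h4 (by intro r' hr'; rcases (by omega : r' = 0 ∨ r' = 1 ∨ r' = 2) with rfl | rfl | rfl; exacts [h1, h2, h3])]
            rfl
          | false =>
            rw [if_neg (by simp : ¬ (false = true))]
            cases h5 : pvHit ql 4 with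
            | true =>
              rw [pv_scan_eq_first ql 4 (by omega) h5 (by intro r' hr'; rcases (by omega : r' = 0 ∨ r' = 1 ∨ r' = 2 ∨ r' = 3) with rfl | rfl | rfl | rfl; exacts [h1, h2, h3, h4])]
              rfl
            | false =>
              rw [if_neg (by simp : ¬ (false = true))]
              rw [pv_scan_none ql (by intro r' hr'; rcases (by omega : r' = 0 ∨ r' = 1 ∨ r' = 2 ∨ r' = 3 ∨ r' = 4) with rfl | rfl | rfl | rfl | rfl; exacts [h1, h2, h3, h4, h5])]

-- ===== VERDICT =====
theorem ai_helper_answer_py_spec : Claim_equal_ai_helper_answer_py := by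
  intro q _
  exact pv_main q
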